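-- pv_equiv track=rewrite | github.com/SamaHadhoud/CP_EVAL | model_1/icpc-jakarta-2017/country_1_solution.py | greedy_suffix
-- ===== SOURCE A (Python) =====
-- import bisect
--
-- def greedy_suffix(S, start, length, pos_map, n):
--     if length == 0:
--         return ""
--     res = []
--     current = start
--     for j in range(length):
--         R_bound = n - (length - j)
--         found_char = None
--         found_index = None
--         for c_code in range(ord('A'), ord('Z') + 1):
--             c_char = chr(c_code)
--             if c_char not in pos_map:
--                 continue
--             arr = pos_map[c_char]
--             pos_in_arr = bisect.bisect_left(arr, current)
--             if pos_in_arr < len(arr) and arr[pos_in_arr] <= R_bound: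
--                 found_char = c_char
--                 found_index = arr[pos_in_arr]
--                 break
--         if found_char is None:
--             return None
--         res.append(found_char)
--         current = found_index + 1
--     return ''.join(res)
-- ===== SOURCE B (Python) =====
-- def greedy_suffix(S, start, length, pos_map, n):
--     # Different algorithm: merge all letter occurrences into one position-sorted
--     # event list, then answer each step's query "minimum (char, pos) in the
--     # position window [current, R]" with a sliding-window-minimum structure:
--     # events enter as R grows, stale positions leave as current grows, and dq
--     # is kept strictly increasing in (char, pos) AND nondecreasing in pos, so
--     # its first element is the window minimum.  A's choice at each step is
--     # exactly that window minimum.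
--     events = sorted((p, ch) for ch, arr in pos_map.items()
--                     if len(ch) == 1 and 'A' <= ch <= 'Z' for p in arr)
--     out = []
--     current = start
--     ei = 0
--     dq = []  # list of (ch, p), increasing in both components
--     for j in range(length):
--         R = n - (length - j)
--         while ei < len(events) and events[ei][0] <= R:
--             p, ch = events[ei]
--             # dq is sorted, so the entries dominated by (ch, p) are a suffix
--             dq = [d for d in dq if d < (ch, p)]
--             dq.append((ch, p))
--             ei += 1
--         dq = [d for d in dq if d[1] >= current]
--         if not dq:
--             return None
--         ch, p = dq[0]
--         out.append(ch)
--         current = p + 1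
--     return ''.join(out)
-- ===== Notes on version B (the rewrite author's own statement) =====
-- stated objective: alternative
-- what changed: B merges all letter occurrences into one position-sorted event list built once and answers each step's query by a sliding-window minimum over (char,pos) (events enter as the deadline grows, stale positions leave, a monotone queue keeps the minimum at its head), instead of A's 26 binary searches per output position.
-- outside the precondition, e.g. on greedy_suffix('', 2, 1, {'A': [5, 1]}, 10): A returns None, B returns 'A'
import Mathlib
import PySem

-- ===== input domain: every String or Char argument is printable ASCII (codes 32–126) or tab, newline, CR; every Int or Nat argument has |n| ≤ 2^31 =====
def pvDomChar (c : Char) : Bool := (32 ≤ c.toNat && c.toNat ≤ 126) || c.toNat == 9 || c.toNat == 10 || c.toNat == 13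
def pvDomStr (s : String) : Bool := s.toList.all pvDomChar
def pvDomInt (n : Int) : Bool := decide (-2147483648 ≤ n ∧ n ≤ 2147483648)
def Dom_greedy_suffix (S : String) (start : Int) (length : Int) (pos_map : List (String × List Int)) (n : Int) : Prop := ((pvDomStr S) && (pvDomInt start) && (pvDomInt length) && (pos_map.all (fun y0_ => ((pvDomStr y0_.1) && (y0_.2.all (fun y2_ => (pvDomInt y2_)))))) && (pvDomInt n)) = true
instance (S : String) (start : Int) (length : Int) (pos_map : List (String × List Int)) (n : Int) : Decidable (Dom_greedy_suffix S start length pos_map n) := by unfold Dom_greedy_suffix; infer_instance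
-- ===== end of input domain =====

-- B replaces A's 26-binary-searches-per-step by one position-sorted event list queried
-- with a sliding-window minimum; proved equal wherever pos_map has no duplicate keys and
-- every uppercase-letter key maps to a sorted position list (Pre_).

-- ===== PORT A =====
-- chr(c_code) for the literal codes 65..90; exact on that range
def gsChr (c : Int) : String := String.ofList [Char.ofNat c.toNat]

-- the inner 'for c_code in range(ord('A'), ord('Z')+1)' loop with its break / continue
def gsFindA (pm : PySem.Dict String (List Int)) (current R_bound : Int) : List Int → Option (String × Int)
  | [] => none
  | c :: rest =>
    let c_char := gsChr c
    match pm.get? c_char with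
    | none => gsFindA pm current R_bound rest
    | some arr =>
      let pos := PySem.List.bisectLeft arr current
      if pos < arr.length ∧ arr.getD pos 0 ≤ R_bound then
        some (c_char, arr.getD pos 0)
      else gsFindA pm current R_bound rest

-- the outer 'for j in range(length)' loop; the remaining count k+1 equals length - j
def gsLoopA (pm : PySem.Dict String (List Int)) (n : Int) : Nat → Int → List String → Option String
  | 0, _, res => some (PySem.Str.join "" res)
  | k + 1, current, res =>
    match gsFindA pm current (n - ((k : Int) + 1)) (PySem.List.pyRange 65 91 1) with
    | none => none
    | some (c, idx) => gsLoopA pm n k (idx + 1) (res ++ [c])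

def greedy_suffix (S : String) (start : Int) (length : Int) (pos_map : List (String × List Int)) (n : Int) : Option String :=
  if length = 0 then some "" else
  gsLoopA (PySem.Dict.mk pos_map) n length.toNat start []

-- ===== PORT B =====
-- 'len(ch) == 1 and "A" <= ch <= "Z"' (on a one-character string Python's compare is the char compare)
def evKeyOK (ch : String) : Bool :=
  match ch.toList with
  | [c] => decide ('A' ≤ c ∧ c ≤ 'Z')
  | _ => false

-- Python tuple '<' on (str, int) pairs
def vLt (a b : String × Int) : Bool :=
  decide (a.1 < b.1) || (a.1 == b.1 && decide (a.2 < b.2))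

-- 'sorted((p, ch) for ch, arr in pos_map.items() if … for p in arr)'
def bEventsRaw (pos_map : List (String × List Int)) : List (Int × String) :=
  (pos_map.filter (fun kv => evKeyOK kv.1)).flatMap (fun kv => kv.2.map (fun p => (p, kv.1)))

def bEvents (pos_map : List (String × List Int)) : List (Int × String) :=
  PySem.List.sorted2 (bEventsRaw pos_map) (·.1) (·.2) false

-- 'while ei < len(events) and events[ei][0] <= R: push; ei += 1' (the unread prefix is passed as a suffix list)
def bAdmit (R : Int) : List (String × Int) → List (Int × String) → List (String × Int) × List (Int × String)
  | dq, [] => (dq, [])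
  | dq, (p, ch) :: rest =>
    if p ≤ R then bAdmit R (dq.filter (fun d => vLt d (ch, p)) ++ [(ch, p)]) rest
    else (dq, (p, ch) :: rest)

-- the 'for j in range(length)' loop; the remaining count k+1 equals length - j
def bLoop (n : Int) : Nat → List (String × Int) → List (Int × String) → Int → List String → Option String
  | 0, _, _, _, out => some (PySem.Str.join "" out)
  | k + 1, dq, evs, current, out =>
    let st := bAdmit (n - ((k : Int) + 1)) dq evs
    let dq' := st.1.filter (fun d => decide (current ≤ d.2))
    match dq' with
    | [] => none
    | (ch, p) :: t => bLoop n k ((ch, p) :: t) st.2 (p + 1) (out ++ [ch])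

def greedy_suffix_alt (S : String) (start : Int) (length : Int) (pos_map : List (String × List Int)) (n : Int) : Option String :=
  bLoop n length.toNat [] (bEvents pos_map) start []

-- ===== PRECONDITION & SPEC =====
-- Pre_ excludes pos_map with duplicate keys (a Python dict cannot carry them, so such
-- association lists denote no Python input) and pos_map mapping an uppercase letter (the
-- only keys consulted) to an UNSORTED position list: bisect_left's contract requires a
-- sorted list, and A's value there is an accident of the binary-search probe order.
def Pre_greedy_suffix (S : String) (start : Int) (length : Int) (pos_map : List (String × List Int)) (n : Int) : Prop :=
  (pos_map.map Prod.fst).Nodup ∧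
  ∀ p ∈ pos_map, evKeyOK p.1 = true → List.Pairwise (· ≤ ·) p.2
instance (S : String) (start : Int) (length : Int) (pos_map : List (String × List Int)) (n : Int) : Decidable (Pre_greedy_suffix S start length pos_map n) := by unfold Pre_greedy_suffix; infer_instance

def pvWitness_greedy_suffix : String × Int × Int × (List (String × List Int)) × Int :=
  ("", 0, 2, [("B", [0, 3]), ("A", [1])], 4)

def Spec_greedy_suffix (S : String) (start : Int) (length : Int) (pos_map : List (String × List Int)) (n : Int) (out : Option String) : Prop := out = greedy_suffix_alt S start length pos_map n
instance (S : String) (start : Int) (length : Int) (pos_map : List (String × List Int)) (n : Int) (out : Option String) : Decidable (Spec_greedy_suffix S start length pos_map n out) := by unfold Spec_greedy_suffix; infer_instance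

-- ===== CLAIM (what is proved, stated in full; the proofs are below) =====
def Claim_equal_greedy_suffix : Prop := ∀ (S : String) (start : Int) (length : Int) (pos_map : List (String × List Int)) (n : Int), Dom_greedy_suffix S start length pos_map n → Pre_greedy_suffix S start length pos_map n → Spec_greedy_suffix S start length pos_map n (greedy_suffix S start length pos_map n)

-- ===== LEMMAS AND PROOFS =====

-- the value order B's queue maintains: Python tuple '<' on (char, position), as a Prop
def vlt (a b : String × Int) : Prop := a.1 < b.1 ∨ (a.1 = b.1 ∧ a.2 < b.2)
def vle (a b : String × Int) : Prop := vlt a b ∨ a = b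

theorem vLt_iff (a b : String × Int) : vLt a b = true ↔ vlt a b := by
  simp [vLt, vlt, Bool.or_eq_true, Bool.and_eq_true, decide_eq_true_eq]

theorem vlt_irrefl (a : String × Int) : ¬ vlt a a := by
  rintro (h | ⟨_, h⟩) <;> exact lt_irrefl _ h

theorem vlt_trans {a b c : String × Int} (h1 : vlt a b) (h2 : vlt b c) : vlt a c := by
  rcases h1 with h1 | ⟨e1, h1⟩ <;> rcases h2 with h2 | ⟨e2, h2⟩
  · exact Or.inl (h1.trans h2)
  · exact Or.inl (e2 ▸ h1)
  · exact Or.inl (e1 ▸ h2)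
  · exact Or.inr ⟨e1.trans e2, h1.trans h2⟩

theorem vle_trans {a b c : String × Int} (h1 : vle a b) (h2 : vle b c) : vle a c := by
  rcases h1 with h1 | rfl
  · rcases h2 with h2 | rfl
    · exact Or.inl (vlt_trans h1 h2)
    · exact Or.inl h1
  · exact h2

theorem vle_total_of_not_vlt {a b : String × Int} (h : ¬ vlt a b) : vle b a := by
  rcases lt_trichotomy b.1 a.1 with hl | he | hg
  · exact Or.inl (Or.inl hl)
  · rcases lt_trichotomy b.2 a.2 with h2 | h2 | h2
    · exact Or.inl (Or.inr ⟨he, h2⟩)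
    · exact Or.inr (Prod.ext_iff.mpr ⟨he, h2⟩)
    · exact absurd (Or.inr ⟨he.symm, h2⟩ : vlt a b) h
  · exact absurd (Or.inl hg : vlt a b) h

theorem vle_antisymm {a b : String × Int} (h1 : vle a b) (h2 : vle b a) : a = b := by
  rcases h1 with h1 | rfl
  · rcases h2 with h2 | rfl
    · exact absurd (vlt_trans h1 h2) (vlt_irrefl a)
    · rfl
  · rfl

-- membership in the raw event list
theorem mem_bEventsRaw (pos_map : List (String × List Int)) (e : Int × String) :
    e ∈ bEventsRaw pos_map ↔ ∃ arr, evKeyOK e.2 = true ∧ (e.2, arr) ∈ pos_map ∧ e.1 ∈ arr := by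
  unfold bEventsRaw
  simp only [List.mem_flatMap, List.mem_filter, List.mem_map]
  constructor
  · rintro ⟨kv, ⟨hmem, hok⟩, p, hp, rfl⟩
    exact ⟨kv.2, hok, by simpa using hmem, hp⟩
  · rintro ⟨arr, hok, hmem, hp⟩
    exact ⟨(e.2, arr), ⟨hmem, hok⟩, e.1, hp, by simp⟩

-- Dict.mk's first-match lookup versus list membership
theorem mk_get?_mem {pos_map : List (String × List Int)} {k : String} {arr : List Int}
    (h : (PySem.Dict.mk pos_map).get? k = some arr) : (k, arr) ∈ pos_map := by
  induction pos_map with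
  | nil => simp [PySem.Dict.get?] at h
  | cons q rest ih =>
    rw [PySem.Dict.get?_mk_cons] at h
    by_cases hk : q.1 == k
    · rw [if_pos hk] at h
      have hk' : q.1 = k := beq_iff_eq.mp hk
      have harr : q.2 = arr := by injection h
      have : (k, arr) = q := by cases q; simp_all
      rw [this]; exact List.mem_cons_self
    · rw [if_neg hk] at h
      exact List.mem_cons_of_mem _ (ih h)

theorem mem_mk_get? {pos_map : List (String × List Int)} (hnd : (pos_map.map Prod.fst).Nodup)
    {k : String} {arr : List Int} (h : (k, arr) ∈ pos_map) :
    (PySem.Dict.mk pos_map).get? k = some arr := by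
  induction pos_map with
  | nil => simp at h
  | cons q rest ih =>
    rw [List.map_cons, List.nodup_cons] at hnd
    rw [PySem.Dict.get?_mk_cons]
    rcases List.mem_cons.mp h with rfl | hmem
    · rw [if_pos (by simp)]
    · have hne : ¬ (q.1 == k) := by
        intro hc
        exact hnd.1 ((beq_iff_eq.mp hc) ▸ List.mem_map.mpr ⟨(k, arr), hmem, rfl⟩)
      rw [if_neg hne]
      exact ih hnd.2 hmem

-- Source B's events.sort() on (int, str) tuples is a sort by the lexicographic key
theorem sorted2_eq_lex (xs : List (Int × String)) :
    PySem.List.sorted2 xs (·.1) (·.2) false =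
    PySem.List.sorted xs (fun e => toLex (e.1, e.2)) false := by
  have h : ∀ (acc : List (Int × String)) (e : Int × String), e ∈ xs →
      PySem.List.insertBy (fun a b =>
        (decide (a.1 < b.1) || (!decide (b.1 < a.1) && decide (a.2 < b.2)))) e acc =
      PySem.List.insertBy (fun a b =>
        decide (toLex (a.1, a.2) < toLex (b.1, b.2))) e acc := by
    intro acc e _
    congr 1
    funext a b
    apply Bool.eq_iff_iff.mpr
    simp only [Bool.or_eq_true, Bool.and_eq_true, Bool.not_eq_true', decide_eq_true_eq,
      decide_eq_false_iff_not, Prod.Lex.lt_iff, ofLex_toLex]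
    constructor
    · rintro (h | ⟨h1, h2⟩)
      · exact Or.inl h
      · rcases lt_trichotomy a.1 b.1 with hc | hc | hc
        · exact Or.inl hc
        · exact Or.inr ⟨hc, h2⟩
        · exact absurd hc h1
    · rintro (h | ⟨h1, h2⟩)
      · exact Or.inl h
      · exact Or.inr ⟨by simp [h1], h2⟩
  exact PySem.List.foldl_congr_mem (init := []) (h := h)

theorem bEvents_perm (pos_map : List (String × List Int)) :
    (bEvents pos_map).Perm (bEventsRaw pos_map) :=
  PySem.List.sorted2_perm _ _ _ _

theorem bEvents_pairwise (pos_map : List (String × List Int)) :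
    (bEvents pos_map).Pairwise (fun a b => a.1 ≤ b.1) := by
  rw [bEvents, sorted2_eq_lex]
  refine (PySem.List.sorted_pairwise (bEventsRaw pos_map)
    (fun e => toLex (e.1, e.2))).imp ?_
  intro a b h
  rw [Prod.Lex.le_iff] at h
  rcases h with h | ⟨h, _⟩
  · exact le_of_lt h
  · exact le_of_eq h

-- ordering single-letter strings is ordering their characters
theorem singleton_str_lt (a b : Char) : (String.ofList [a] < String.ofList [b]) ↔ a < b := by
  constructor
  · intro h
    have h2 : ([a] : List Char) < [b] := by simpa using h
    rcases List.cons_lt_cons_iff.mp h2 with h3 | ⟨_, h3⟩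
    · exact h3
    · exact absurd h3 (lt_irrefl _)
  · intro h
    have h2 : ([a] : List Char) < [b] := List.cons_lt_cons_iff.mpr (Or.inl h)
    simpa using h2

-- codes 65..90 and the 26 letter keys
theorem evKeyOK_gsChr : ∀ c ∈ PySem.List.pyRange 65 91 1, evKeyOK (gsChr c) = true := by
  intro c hc
  rw [PySem.List.mem_pyRange_one] at hc
  obtain ⟨h1, h2⟩ := hc
  interval_cases c <;> decide

theorem gsChr_lt : ∀ c ∈ PySem.List.pyRange 65 91 1, ∀ c' ∈ PySem.List.pyRange 65 91 1,
    c < c' → gsChr c < gsChr c' := by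
  intro c hc c' hc' hlt
  rw [PySem.List.mem_pyRange_one] at hc hc'
  obtain ⟨h1, h2⟩ := hc
  obtain ⟨h3, h4⟩ := hc'
  unfold gsChr
  rw [singleton_str_lt]
  interval_cases c <;> interval_cases c' <;> first | decide | omega

theorem gsChr_of_evKeyOK {ch : String} (h : evKeyOK ch = true) :
    ∃ c ∈ PySem.List.pyRange 65 91 1, ch = gsChr c := by
  unfold evKeyOK at h
  cases htl : ch.toList with
  | nil => rw [htl] at h; cases h
  | cons c0 tl =>
    cases tl with
    | cons _ _ => rw [htl] at h; cases h
    | nil =>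
      rw [htl] at h
      have hb : 'A' ≤ c0 ∧ c0 ≤ 'Z' := by simpa using h
      have hA : (65 : Nat) ≤ c0.toNat := hb.1
      have hZ : c0.toNat ≤ 90 := hb.2
      refine ⟨(c0.toNat : Int), ?_, ?_⟩
      · rw [PySem.List.mem_pyRange_one]
        omega
      · unfold gsChr
        rw [show ((c0.toNat : Int)).toNat = c0.toNat by omega, Char.ofNat_toNat,
          ← htl, String.ofList_toList]

-- bisect facts on a sorted array
theorem bisect_found {arr : List Int} (hs : List.Pairwise (· ≤ ·) arr) {x : Int}
    (h : PySem.List.bisectLeft arr x < arr.length) :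
    x ≤ arr.getD (PySem.List.bisectLeft arr x) 0 ∧
    arr.getD (PySem.List.bisectLeft arr x) 0 ∈ arr := by
  obtain ⟨hle, hlt, hge⟩ := PySem.List.bisectLeft_spec arr x hs
  rw [List.getD_eq_getElem arr 0 h]
  exact ⟨hge _ h le_rfl, List.getElem_mem h⟩

theorem bisect_min {arr : List Int} (hs : List.Pairwise (· ≤ ·) arr) {x q : Int}
    (hq : q ∈ arr) (hxq : x ≤ q) :
    PySem.List.bisectLeft arr x < arr.length ∧ arr.getD (PySem.List.bisectLeft arr x) 0 ≤ q := by
  obtain ⟨hle, hlt, hge⟩ := PySem.List.bisectLeft_spec arr x hs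
  obtain ⟨i, hi, rfl⟩ := List.mem_iff_getElem.mp hq
  have hpi : PySem.List.bisectLeft arr x ≤ i := by
    by_contra hc
    push_neg at hc
    exact absurd (hlt i hi hc) (not_lt.mpr hxq)
  have hlen : PySem.List.bisectLeft arr x < arr.length := lt_of_le_of_lt hpi hi
  refine ⟨hlen, ?_⟩
  rw [List.getD_eq_getElem arr 0 hlen]
  rcases eq_or_lt_of_le hpi with he | hl
  · simp [he]
  · exact (List.pairwise_iff_getElem.mp hs) _ _ hlen hi hl

-- what it means for letter code c to have an occurrence in the window [x, R]
def CWin (pm : PySem.Dict String (List Int)) (x R : Int) (c : Int) : Prop :=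
  ∃ arr, pm.get? (gsChr c) = some arr ∧ ∃ p ∈ arr, x ≤ p ∧ p ≤ R

-- A's inner scan: none iff no scanned letter occurs in the window
theorem findA_none (pm : PySem.Dict String (List Int)) (x R : Int) (codes : List Int)
    (hs : ∀ c ∈ codes, ∀ arr, pm.get? (gsChr c) = some arr → List.Pairwise (· ≤ ·) arr) :
    gsFindA pm x R codes = none ↔ ∀ c ∈ codes, ¬ CWin pm x R c := by
  induction codes with
  | nil => simp [gsFindA]
  | cons c rest ih =>
    have ih' := ih (fun d hd => hs d (List.mem_cons_of_mem _ hd))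
    cases hg : pm.get? (gsChr c) with
    | none =>
      simp only [gsFindA, hg]
      simp only [List.forall_mem_cons]
      rw [ih']
      have : ¬ CWin pm x R c := by rintro ⟨arr, harr, _⟩; rw [hg] at harr; cases harr
      tauto
    | some arr =>
      have hsarr := hs c List.mem_cons_self arr hg
      simp only [gsFindA, hg]
      by_cases hcond : PySem.List.bisectLeft arr x < arr.length ∧
          arr.getD (PySem.List.bisectLeft arr x) 0 ≤ R
      · rw [if_pos hcond]
        simp only [List.forall_mem_cons]
        constructor
        · intro h; cases h
        · intro ⟨h1, _⟩
          obtain ⟨hx, hmem⟩ := bisect_found hsarr hcond.1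
          exact absurd ⟨arr, hg, _, hmem, hx, hcond.2⟩ h1
      · rw [if_neg hcond]
        simp only [List.forall_mem_cons]
        rw [ih']
        have : ¬ CWin pm x R c := by
          rintro ⟨arr', harr', p, hp, hxp, hpR⟩
          rw [hg] at harr'
          injection harr' with he
          subst he
          obtain ⟨h1, h2⟩ := bisect_min hsarr hp hxp
          exact hcond ⟨h1, h2.trans hpR⟩
        tauto

-- A's inner scan: the hit is a window occurrence, minimal in position for its letter,
-- and no strictly smaller scanned letter occurs in the window
theorem findA_some (pm : PySem.Dict String (List Int)) (x R : Int) (codes : List Int)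
    (hs : ∀ c ∈ codes, ∀ arr, pm.get? (gsChr c) = some arr → List.Pairwise (· ≤ ·) arr)
    (hps : codes.Pairwise (· ≤ ·)) {s : String} {p : Int}
    (h : gsFindA pm x R codes = some (s, p)) :
    ∃ c ∈ codes, s = gsChr c ∧
      (∃ arr, pm.get? (gsChr c) = some arr ∧ p ∈ arr ∧ x ≤ p ∧ p ≤ R ∧
        ∀ q ∈ arr, x ≤ q → p ≤ q) ∧
      ∀ c' ∈ codes, CWin pm x R c' → c ≤ c' := by
  induction codes with
  | nil => cases h
  | cons c rest ih =>
    have hs' := fun d hd => hs d (List.mem_cons_of_mem _ hd)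
    rw [List.pairwise_cons] at hps
    cases hg : pm.get? (gsChr c) with
    | none =>
      simp only [gsFindA, hg] at h
      obtain ⟨c1, hc1, hsc, hwin, hmin⟩ := ih hs' hps.2 h
      refine ⟨c1, List.mem_cons_of_mem _ hc1, hsc, hwin, ?_⟩
      intro c' hc' hw
      rcases List.mem_cons.mp hc' with rfl | hc'
      · obtain ⟨arr, harr, _⟩ := hw; rw [hg] at harr; cases harr
      · exact hmin c' hc' hw
    | some arr =>
      simp only [gsFindA, hg] at h
      have hsarr := hs c List.mem_cons_self arr hg
      by_cases hcond : PySem.List.bisectLeft arr x < arr.length ∧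
          arr.getD (PySem.List.bisectLeft arr x) 0 ≤ R
      · rw [if_pos hcond] at h
        injection h with h2
        have hs1 : s = gsChr c := (congrArg Prod.fst h2).symm
        have hp1 : arr.getD (PySem.List.bisectLeft arr x) 0 = p := congrArg Prod.snd h2
        obtain ⟨hx, hmem⟩ := bisect_found hsarr hcond.1
        refine ⟨c, List.mem_cons_self, hs1, ⟨arr, hg, hp1 ▸ hmem, hp1 ▸ hx, hp1 ▸ hcond.2, ?_⟩, ?_⟩
        · intro q hq hxq
          obtain ⟨_, h2'⟩ := bisect_min hsarr hq hxq
          exact hp1 ▸ h2'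
        · intro c' hc' _
          rcases List.mem_cons.mp hc' with rfl | hc'
          · exact le_refl _
          · exact hps.1 c' hc'
      · rw [if_neg hcond] at h
        obtain ⟨c1, hc1, hsc, hwin, hmin⟩ := ih hs' hps.2 h
        refine ⟨c1, List.mem_cons_of_mem _ hc1, hsc, hwin, ?_⟩
        intro c' hc' hw
        rcases List.mem_cons.mp hc' with rfl | hc'
        · exfalso
          obtain ⟨arr', harr', q, hq, hxq, hqR⟩ := hw
          rw [hg] at harr'
          injection harr' with he
          subst he
          obtain ⟨h1, h2⟩ := bisect_min hsarr hq hxq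
          exact hcond ⟨h1, h2.trans hqR⟩
        · exact hmin c' hc' hw

-- the queue invariant: dq strictly increasing in value and nondecreasing in position,
-- contains only admitted events, and dominates every admitted event still ≥ x
def DqInv (done : List (Int × String)) (dq : List (String × Int)) (x R : Int) : Prop :=
  dq.Pairwise vlt ∧
  dq.Pairwise (fun d d' => d.2 ≤ d'.2) ∧
  (∀ d ∈ dq, (d.2, d.1) ∈ done) ∧
  (∀ e ∈ done, x ≤ e.1 → ∃ d ∈ dq, e.1 ≤ d.2 ∧ vle d (e.2, e.1)) ∧
  (∀ e ∈ done, e.1 ≤ R)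

theorem bAdmit_spec (R : Int) (evs : List (Int × String)) :
    ∀ (dq : List (String × Int)) (done : List (Int × String)) (x R' : Int),
    DqInv done dq x R' → R' ≤ R →
    evs.Pairwise (fun a b => a.1 ≤ b.1) →
    (∀ d ∈ dq, ∀ e ∈ evs, d.2 ≤ e.1) →
    ∃ adm, evs = adm ++ (bAdmit R dq evs).2 ∧
      DqInv (done ++ adm) (bAdmit R dq evs).1 x R ∧
      (∀ e ∈ (bAdmit R dq evs).2, R < e.1) ∧
      (∀ d ∈ (bAdmit R dq evs).1, ∀ e ∈ (bAdmit R dq evs).2, d.2 ≤ e.1) ∧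
      (bAdmit R dq evs).2.Pairwise (fun a b => a.1 ≤ b.1) := by
  induction evs with
  | nil =>
    intro dq done x R' hinv hR _ _
    obtain ⟨h1, h2, h3, h4, h5⟩ := hinv
    exact ⟨[], by simp [bAdmit], ⟨h1, h2, by simpa using h3, by simpa using h4,
      fun e he => (h5 e (by simpa using he)).trans hR⟩, by simp [bAdmit], by simp [bAdmit],
      by simp [bAdmit]⟩
  | cons ev rest ih =>
    intro dq done x R' hinv hR hevp hposs
    obtain ⟨ev_p, ev_c⟩ := ev
    obtain ⟨h1, h2, h3, h4, h5⟩ := hinv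
    rw [List.pairwise_cons] at hevp
    by_cases hp : ev_p ≤ R
    · have hstep : bAdmit R dq ((ev_p, ev_c) :: rest) =
        bAdmit R (dq.filter (fun d => vLt d (ev_c, ev_p)) ++ [(ev_c, ev_p)]) rest := by
        simp only [bAdmit, if_pos hp]
      set v : String × Int := (ev_c, ev_p) with hv
      set dq2 := dq.filter (fun d => vLt d v) ++ [v] with hdq2
      have hmemdq2 : ∀ d ∈ dq2, d = v ∨ (d ∈ dq ∧ vlt d v) := by
        intro d hd
        rcases List.mem_append.mp hd with hd | hd
        · obtain ⟨hd1, hd2⟩ := List.mem_filter.mp hd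
          exact Or.inr ⟨hd1, (vLt_iff _ _).mp hd2⟩
        · exact Or.inl (by simpa using hd)
      have hposv : ∀ d ∈ dq, d.2 ≤ ev_p := fun d hd => hposs d hd _ List.mem_cons_self
      have hinv2 : DqInv (done ++ [(ev_p, ev_c)]) dq2 x R := by
        refine ⟨?_, ?_, ?_, ?_, ?_⟩
        · rw [hdq2, List.pairwise_append]
          refine ⟨h1.filter _, List.pairwise_singleton _ _, ?_⟩
          intro d hd v' hv'
          obtain ⟨_, hd2⟩ := List.mem_filter.mp hd
          rw [show v' = v by simpa using hv']
          exact (vLt_iff _ _).mp hd2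
        · rw [hdq2, List.pairwise_append]
          refine ⟨h2.filter _, List.pairwise_singleton _ _, ?_⟩
          intro d hd v' hv'
          rw [show v' = v by simpa using hv']
          exact hposv d (List.mem_filter.mp hd).1
        · intro d hd
          rcases hmemdq2 d hd with rfl | ⟨hd1, _⟩
          · exact List.mem_append.mpr (Or.inr (by simp [hv]))
          · exact List.mem_append.mpr (Or.inl (h3 d hd1))
        · intro e he hxe
          rcases List.mem_append.mp he with he | he
          · obtain ⟨d, hd, hed, hvled⟩ := h4 e he hxe
            by_cases hdlt : vLt d v
            · exact ⟨d, List.mem_append.mpr (Or.inl (List.mem_filter.mpr ⟨hd, hdlt⟩)), hed, hvled⟩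
            · have hvd : vle v d := vle_total_of_not_vlt (fun hc => hdlt ((vLt_iff _ _).mpr hc))
              refine ⟨v, List.mem_append.mpr (Or.inr (by simp)), ?_, vle_trans hvd hvled⟩
              exact hed.trans (hposv d hd)
          · rw [show e = (ev_p, ev_c) by simpa using he]
            exact ⟨v, List.mem_append.mpr (Or.inr (by simp)), le_refl _, Or.inr rfl⟩
        · intro e he
          rcases List.mem_append.mp he with he | he
          · exact (h5 e he).trans hR
          · rw [show e = (ev_p, ev_c) by simpa using he]
            exact hp
      have hposs2 : ∀ d ∈ dq2, ∀ e ∈ rest, d.2 ≤ e.1 := by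
        intro d hd e he
        rcases hmemdq2 d hd with rfl | ⟨hd1, _⟩
        · exact hevp.1 e he
        · exact hposs d hd1 e (List.mem_cons_of_mem _ he)
      obtain ⟨adm, hsplit, hinv3, hrest, hposs3, hrestp⟩ :=
        ih dq2 (done ++ [(ev_p, ev_c)]) x R hinv2 (le_refl R) hevp.2 hposs2
      rw [hstep]
      refine ⟨(ev_p, ev_c) :: adm, by rw [List.cons_append, ← hsplit], ?_, hrest, hposs3, hrestp⟩
      rwa [show done ++ (ev_p, ev_c) :: adm = (done ++ [(ev_p, ev_c)]) ++ adm by simp]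
    · have hstep : bAdmit R dq ((ev_p, ev_c) :: rest) = (dq, (ev_p, ev_c) :: rest) := by
        simp only [bAdmit, if_neg hp]
      rw [hstep]
      refine ⟨[], by simp, ⟨h1, h2, by simpa using h3, by simpa using h4,
        fun e he => (h5 e (by simpa using he)).trans hR⟩, ?_, by simpa using hposs,
        List.pairwise_cons.mpr hevp⟩
      intro e he
      rcases List.mem_cons.mp he with rfl | he
      · omega
      · exact lt_of_lt_of_le (by omega) (hevp.1 e he)

-- the two outer loops agree step by step
theorem loop_eq (pos_map : List (String × List Int))
    (hnd : (pos_map.map Prod.fst).Nodup)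
    (hsort : ∀ q ∈ pos_map, evKeyOK q.1 = true → List.Pairwise (· ≤ ·) q.2)
    (n : Int) (fuel : Nat) :
    ∀ (x : Int) (res : List String) (done evs : List (Int × String)) (dq : List (String × Int)),
    bEvents pos_map = done ++ evs →
    DqInv done dq x (n - ((fuel : Int) + 1)) →
    evs.Pairwise (fun a b => a.1 ≤ b.1) →
    (∀ d ∈ dq, ∀ e ∈ evs, d.2 ≤ e.1) →
    gsLoopA (PySem.Dict.mk pos_map) n fuel x res = bLoop n fuel dq evs x res := by
  induction fuel with
  | zero => intro x res done evs dq _ _ _ _; rfl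
  | succ k ih =>
    intro x res done evs dq hsplit hinv hevp hposs
    set pm := PySem.Dict.mk pos_map with hpm
    set R : Int := n - ((k : Int) + 1) with hRdef
    have hs : ∀ c ∈ PySem.List.pyRange 65 91 1, ∀ arr, pm.get? (gsChr c) = some arr →
        List.Pairwise (· ≤ ·) arr := by
      intro c hc arr hg
      exact hsort _ (mk_get?_mem hg) (evKeyOK_gsChr c hc)
    have hRR : n - (((k : Nat) + 1 : Nat) : Int) - 1 ≤ R := by push_cast; omega
    obtain ⟨adm, hsplit2, hinv2, hrest, hposs2, hrestp⟩ :=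
      bAdmit_spec R evs dq done x _ hinv (by rw [hRdef]; push_cast; omega) hevp hposs
    obtain ⟨hq1, hq2, hq3, hq4, hq5⟩ := hinv2
    set dq2 := (bAdmit R dq evs).1 with hdq2def
    set rest := (bAdmit R dq evs).2 with hrestdef
    have hsplit3 : bEvents pos_map = (done ++ adm) ++ rest := by
      rw [hsplit, hsplit2, List.append_assoc]
    -- every raw event in the window [x, R] has already been admitted
    have hadm : ∀ e : Int × String, e ∈ bEventsRaw pos_map → x ≤ e.1 → e.1 ≤ R →
        e ∈ done ++ adm := by
      intro e hraw _ heR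
      have hmem : e ∈ (done ++ adm) ++ rest := by
        rw [← hsplit3]; exact ((bEvents_perm pos_map).mem_iff).mpr hraw
      rcases List.mem_append.mp hmem with hmem | hmem
      · exact hmem
      · exact absurd (hrest e hmem) (not_lt.mpr heR)
    simp only [gsLoopA, bLoop]
    rw [← hRdef, ← hdq2def, ← hrestdef]
    cases hdq' : dq2.filter (fun d => decide (x ≤ d.2)) with
    | nil =>
      -- the window is empty: A's scan finds nothing either
      have hnone : gsFindA pm x R (PySem.List.pyRange 65 91 1) = none := by
        rw [findA_none pm x R _ hs]
        rintro c hc ⟨arr, hg, p, hparr, hxp, hpR⟩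
        have hraw : ((p, gsChr c) : Int × String) ∈ bEventsRaw pos_map :=
          (mem_bEventsRaw pos_map _).mpr ⟨arr, evKeyOK_gsChr c hc, mk_get?_mem hg, hparr⟩
        obtain ⟨d, hd, hpd, _⟩ := hq4 _ (hadm _ hraw hxp hpR) hxp
        have : d ∈ dq2.filter (fun d => decide (x ≤ d.2)) :=
          List.mem_filter.mpr ⟨hd, by simp; omega⟩
        rw [hdq'] at this
        cases this
      rw [hnone]
    | cons hd0 t =>
      obtain ⟨ch0, p0⟩ := hd0
      have hhd : (ch0, p0) ∈ dq2.filter (fun d => decide (x ≤ d.2)) := by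
        rw [hdq']; exact List.mem_cons_self
      obtain ⟨hhd1, hhd2'⟩ := List.mem_filter.mp hhd
      have hhd2 : x ≤ p0 := by simpa using hhd2'
      have hdone : ((p0, ch0) : Int × String) ∈ done ++ adm := hq3 _ hhd1
      have hp0R : p0 ≤ R := hq5 _ hdone
      have hraw0 : ((p0, ch0) : Int × String) ∈ bEventsRaw pos_map := by
        have : ((p0, ch0) : Int × String) ∈ (done ++ adm) ++ rest :=
          List.mem_append.mpr (Or.inl hdone)
        rw [← hsplit3] at this
        exact ((bEvents_perm pos_map).mem_iff).mp this
      obtain ⟨arr0, hok0, hmem0, hparr0⟩ := (mem_bEventsRaw pos_map _).mp hraw0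
      dsimp only at hok0 hmem0 hparr0
      have hg0 : pm.get? ch0 = some arr0 := mem_mk_get? hnd hmem0
      obtain ⟨c0, hc0, hch0⟩ := gsChr_of_evKeyOK hok0
      have hCWin0 : CWin pm x R c0 := ⟨arr0, hch0 ▸ hg0, p0, hparr0, hhd2, hp0R⟩
      -- A's scan must find something
      cases hfind : gsFindA pm x R (PySem.List.pyRange 65 91 1) with
      | none => exact absurd hCWin0 ((findA_none pm x R _ hs).mp hfind c0 hc0)
      | some sp =>
        obtain ⟨s, p⟩ := sp
        obtain ⟨c, hc, hsc, ⟨arrA, hgA, hpA, hxp, hpR, hminp⟩, hminc⟩ :=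
          findA_some pm x R _ hs (by decide) hfind
        -- A's hit, as a queue value
        have hrawA : ((p, s) : Int × String) ∈ bEventsRaw pos_map :=
          (mem_bEventsRaw pos_map _).mpr ⟨arrA, hsc ▸ evKeyOK_gsChr c hc,
            mk_get?_mem (hsc ▸ hgA), hpA⟩
        -- vle (s, p) (ch0, p0)
        have hle1 : vle (s, p) (ch0, p0) := by
          have hcc : c ≤ c0 := hminc c0 hc0 hCWin0
          rcases eq_or_lt_of_le hcc with rfl | hlt
          · -- same letter: minimal position for it
            have hkey : s = ch0 := by rw [hsc, hch0]
            have harr : arrA = arr0 := by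
              rw [hch0] at hg0
              rw [hgA] at hg0
              injection hg0
            have hple : p ≤ p0 := hminp p0 (harr ▸ hparr0) hhd2
            rcases eq_or_lt_of_le hple with rfl | hplt
            · exact Or.inr (by rw [hkey])
            · exact Or.inl (Or.inr ⟨hkey, hplt⟩)
          · exact Or.inl (Or.inl (by rw [hsc, hch0]; exact gsChr_lt c hc c0 hc0 hlt))
        -- vle (ch0, p0) (s, p)
        have hle2 : vle (ch0, p0) (s, p) := by
          obtain ⟨d, hd, hpd, hvled⟩ := hq4 _ (hadm _ hrawA hxp hpR) hxp
          have hdmem : d ∈ dq2.filter (fun d => decide (x ≤ d.2)) :=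
            List.mem_filter.mpr ⟨hd, by simp; omega⟩
          have hhdd : vle (ch0, p0) d := by
            rw [hdq'] at hdmem
            rcases List.mem_cons.mp hdmem with rfl | hdmem
            · exact Or.inr rfl
            · have hpw : (dq2.filter (fun d => decide (x ≤ d.2))).Pairwise vlt := hq1.filter _
              rw [hdq'] at hpw
              exact Or.inl ((List.pairwise_cons.mp hpw).1 d hdmem)
          exact vle_trans hhdd hvled
        have heq : ((s, p) : String × Int) = (ch0, p0) := vle_antisymm hle1 hle2
        have hseq : s = ch0 := congrArg Prod.fst heq
        have hpeq : p = p0 := congrArg Prod.snd heq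
        -- step both loops
        rw [hseq, hpeq]
        have hinv' : DqInv (done ++ adm) (dq2.filter (fun d => decide (x ≤ d.2))) (p0 + 1) R := by
          refine ⟨hq1.filter _, hq2.filter _, ?_, ?_, hq5⟩
          · intro d hd; exact hq3 d (List.mem_filter.mp hd).1
          · intro e he hxe
            have hxe' : x ≤ e.1 := by omega
            obtain ⟨d, hd, hed, hvled⟩ := hq4 e he hxe'
            exact ⟨d, List.mem_filter.mpr ⟨hd, by simp; omega⟩, hed, hvled⟩
        have hposs' : ∀ d ∈ dq2.filter (fun d => decide (x ≤ d.2)), ∀ e ∈ rest, d.2 ≤ e.1 := by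
          intro d hd e he
          exact hposs2 d (List.mem_filter.mp hd).1 e he
        rw [hdq'] at hinv' hposs'
        exact ih (p0 + 1) (res ++ [ch0]) (done ++ adm) rest ((ch0, p0) :: t)
          hsplit3 hinv' hrestp hposs'

-- ===== VERDICT (by name: the statement is the Claim_ definition above) =====
theorem greedy_suffix_spec : Claim_equal_greedy_suffix := by
  intro S start length pos_map n _ hpre
  obtain ⟨hnd, hsort⟩ := hpre
  unfold Spec_greedy_suffix greedy_suffix greedy_suffix_alt
  by_cases h0 : length = 0
  · subst h0; rfl
  · rw [if_neg h0]
    exact loop_eq pos_map hnd hsort n length.toNat start [] [] (bEvents pos_map) []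
      rfl ⟨List.Pairwise.nil, List.Pairwise.nil, by simp, by simp, by simp⟩
      (bEvents_pairwise pos_map) (by simp)
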